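-- pv_equiv track=rewrite | github.com/edgarstansfield/Algo2Sem | Lab 4/second.py | tresure_map
-- ===== SOURCE A (Python) =====
-- def tresure_map(s):
--     s = ''.join(s.split())
--     prev_char = {}
--     my_l = [[0, 0] for _ in range(len(s))]
--
--     for ind, char in enumerate(s):
--         prev_i = prev_char.get(char, None)
--         if prev_i is not None:
--             my_l[ind][0] = my_l[prev_i][0] + 1
--             my_l[ind][1] = my_l[prev_i][1] + my_l[prev_i][0] * (ind - prev_i) + (ind - prev_i - 1)
--         else:
--             my_l[ind] = [0, 0]
--         prev_char[char] = ind
--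
--     total = sum(i[1] for i in my_l)
--     return total
-- ===== SOURCE B (Python) =====
-- def tresure_map(s):
--     s = ''.join(s.split())
--     total = 0
--     for j in range(len(s)):
--         for i in range(j):
--             if s[i] == s[j]:
--                 total += j - i - 1
--     return total
-- ===== Notes on version B (the rewrite author's own statement) =====
-- stated objective: simpler
-- what changed: Replaces the one-pass DP (a dict of last occurrences plus a per-index [count, spacing-sum] table) by a direct double loop that sums j-i-1 over every pair i<j of equal characters in the whitespace-stripped string.
import Mathlib
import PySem

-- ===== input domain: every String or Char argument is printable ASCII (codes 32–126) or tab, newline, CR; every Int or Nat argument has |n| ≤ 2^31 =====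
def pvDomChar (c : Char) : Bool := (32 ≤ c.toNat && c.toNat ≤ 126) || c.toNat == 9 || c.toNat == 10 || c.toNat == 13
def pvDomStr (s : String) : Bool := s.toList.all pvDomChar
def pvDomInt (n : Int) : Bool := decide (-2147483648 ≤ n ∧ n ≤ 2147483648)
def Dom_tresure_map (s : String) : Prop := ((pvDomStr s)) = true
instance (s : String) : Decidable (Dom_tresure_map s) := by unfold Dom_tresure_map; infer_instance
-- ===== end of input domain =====

-- B replaces A's one-pass DP (dict of last occurrences + per-index [count, spacing-sum] table)
-- by a plain double loop summing j-i-1 over pairs of equal characters: simpler, not faster.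

-- ===== PORT A =====
-- one step of A's 'for ind, char in enumerate(s)' loop; state = (my_l, prev_char)
def tmStep (st : List (Int × Int) × PySem.Dict Char Int) (p : Int × Char) :
    List (Int × Int) × PySem.Dict Char Int :=
  match st, p with
  | (myl, prev), (ind, char) =>
    match prev.get? char with
    | some pi =>
        let e := PySem.List.pyGetD myl pi (0, 0)
        (PySem.List.pySetD myl ind (e.1 + 1, e.2 + e.1 * (ind - pi) + (ind - pi - 1)),
         prev.insert char ind)
    | none => (PySem.List.pySetD myl ind (0, 0), prev.insert char ind)

def tresure_map (s : String) : Int :=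
  let t := (PySem.Str.join "" (PySem.Str.split₀ s)).toList   -- s = ''.join(s.split())
  let myl0 : List (Int × Int) := (List.range t.length).map (fun _ => (0, 0))
  let fin := (PySem.List.enumerate t).foldl tmStep (myl0, PySem.Dict.empty)
  (fin.1.map (·.2)).sum

-- ===== PORT B =====
def tresure_map_alt (s : String) : Int :=
  let t := (PySem.Str.join "" (PySem.Str.split₀ s)).toList   -- s = ''.join(s.split())
  (PySem.List.pyRange 0 (t.length : Int) 1).foldl (fun tot j =>
    (PySem.List.pyRange 0 j 1).foldl (fun tot i =>
      if PySem.List.pyGetD t i ' ' == PySem.List.pyGetD t j ' ' then tot + (j - i - 1) else tot)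
      tot) 0

-- ===== PRECONDITION & SPEC =====
def Spec_tresure_map (s : String) (out : Int) : Prop := out = tresure_map_alt s
instance (s : String) (out : Int) : Decidable (Spec_tresure_map s out) := by unfold Spec_tresure_map; infer_instance

-- ===== CLAIM (what is proved, stated in full; the proofs are below) =====
def Claim_equal_tresure_map : Prop := ∀ (s : String), Dom_tresure_map s → Spec_tresure_map s (tresure_map s)

-- ===== LEMMAS AND PROOFS =====

-- character of t at index i (kept abstract so simp does not normalise it away)
def chAt (t : List Char) (i : Nat) : Char := t.getD i ' '

-- indices i < k at which t carries character c
def occC (t : List Char) (k : Nat) (c : Char) : List Nat :=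
  (List.range k).filter (fun i => chAt t i == c)

-- the two DP quantities A maintains at position p: count of earlier equal chars, and Σ (p-i-1)
def aV (t : List Char) (p : Nat) : Int := ((occC t p (chAt t p)).length : Int)
def bV (t : List Char) (p : Nat) : Int :=
  ((occC t p (chAt t p)).map (fun i : Nat => (p : Int) - (i : Int) - 1)).sum

def mylSpec (t : List Char) (k : Nat) : List (Int × Int) :=
  (List.range t.length).map (fun p => if p < k then (aV t p, bV t p) else (0, 0))

lemma occC_succ (t : List Char) (k : Nat) (c : Char) :
    occC t (k + 1) c = occC t k c ++ (if chAt t k == c then [k] else []) := by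
  rw [occC, List.range_succ, List.filter_append, occC]
  simp [List.filter_singleton]

lemma occC_eq_of_gap (t : List Char) (p k : Nat) (c : Char) (hpk : p < k)
    (hgap : ∀ q, p < q → q < k → (chAt t q == c) = false) :
    occC t k c = occC t (p + 1) c := by
  induction k with
  | zero => omega
  | succ k ih =>
    rcases Nat.lt_or_ge p k with h | h
    · rw [occC_succ, ih h (fun q h1 h2 => hgap q h1 (by omega)),
        hgap k h (by omega)]
      simp
    · have : p = k := by omega
      subst this; rfl

lemma getLast?_occC (t : List Char) (k : Nat) (c : Char) (p : Nat)
    (h : (occC t k c).getLast? = some p) :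
    p < k ∧ (chAt t p == c) = true ∧ occC t k c = occC t p c ++ [p] := by
  have hmem : p ∈ occC t k c := List.mem_of_getLast? h
  have hp : p < k ∧ (chAt t p == c) = true := by
    have := hmem
    rw [occC, List.mem_filter, List.mem_range] at this
    exact this
  refine ⟨hp.1, hp.2, ?_⟩
  have hgap : ∀ q, p < q → q < k → (chAt t q == c) = false := by
    intro q h1 h2
    by_contra hq
    have hq' : (chAt t q == c) = true := by
      cases hqe : (chAt t q == c) <;> simp_all
    -- q would be a later element of the (sorted) filter, contradicting getLast? = some p
    have hqmem : q ∈ occC t k c := by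
      rw [occC, List.mem_filter, List.mem_range]; exact ⟨h2, hq'⟩
    have hsort : (occC t k c).Pairwise (· < ·) := by
      exact List.Pairwise.sublist (List.filter_sublist) (List.pairwise_lt_range)
    have hle : q ≤ p := by
      rcases List.getLast?_eq_some_iff.mp h with ⟨ys, hys⟩
      rcases List.mem_append.mp (hys ▸ hqmem) with hmemys | hlast
      · have : q < p := by
          have := List.pairwise_append.mp (hys ▸ hsort)
          exact this.2.2 q hmemys p (by simp)
        omega
      · simp at hlast; omega
    omega
  have := occC_eq_of_gap t p k c hp.1 hgap
  rw [this, occC_succ, hp.2]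
  simp

-- dict invariant: prev_char maps c to the last index < k holding c
def dInv (t : List Char) (k : Nat) (d : PySem.Dict Char Int) : Prop :=
  ∀ c, d.get? c = ((occC t k c).getLast?).map (fun i => (i : Int))

lemma take_succ_chAt (t : List Char) (k : Nat) (hk : k < t.length) :
    t.take (k + 1) = t.take k ++ [chAt t k] := by
  rw [List.take_add_one, List.getElem?_eq_getElem hk]
  simp [chAt, List.getD, List.getElem?_eq_getElem hk]

lemma mylSpec_set (t : List Char) (k : Nat) (hk : k < t.length) :
    (mylSpec t k).set k (aV t k, bV t k) = mylSpec t (k + 1) := by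
  apply List.ext_getElem
  · simp [mylSpec]
  · intro p h1 h2
    simp only [mylSpec, List.getElem_set, List.getElem_map, List.getElem_range]
    by_cases hpk : p = k
    · subst hpk; simp
    · have hkp : ¬ k = p := fun h => hpk h.symm
      simp only [if_neg hkp]
      by_cases h3 : p < k
      · simp [h3, show p < k + 1 by omega]
      · simp [h3, show ¬ p < k + 1 by omega]

lemma getD_mylSpec (t : List Char) (k p : Nat) (hp : p < t.length) (hpk : p < k) :
    (mylSpec t k).getD p (0, 0) = (aV t p, bV t p) := by
  rw [List.getD_eq_getElem?_getD]
  simp [mylSpec, hp, hpk]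

-- one step of the invariant
lemma aLoop_step (t : List Char) (k : Nat) (hk : k < t.length) (d : PySem.Dict Char Int)
    (hd : dInv t k d) :
    tmStep (mylSpec t k, d) ((k : Int), chAt t k) = (mylSpec t (k + 1),
      (tmStep (mylSpec t k, d) ((k : Int), chAt t k)).2)
    ∧ dInv t (k + 1) (tmStep (mylSpec t k, d) ((k : Int), chAt t k)).2 := by
  set c := chAt t k with hc
  cases hlast : (occC t k c).getLast? with
  | none =>
    have hocc : occC t k c = [] := by simpa using hlast
    have hdc : d.get? c = none := by rw [hd c, hlast]; rfl
    have hstep : tmStep (mylSpec t k, d) ((k : Int), c) =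
        ((mylSpec t k).set k (0, 0), d.insert c (k : Int)) := by
      simp [tmStep, hdc]
    have hocc' : occC t k (chAt t k) = [] := by rw [← hc]; exact hocc
    have ha : aV t k = 0 := by simp [aV, hocc']
    have hb : bV t k = 0 := by simp [bV, hocc']
    have hset := mylSpec_set t k hk
    rw [ha, hb] at hset
    constructor
    · rw [hstep, hset]
    · intro c'
      rw [hstep]
      rw [PySem.Dict.get?_insert, occC_succ]
      by_cases h' : c' = c
      · have hbe : (chAt t k == c') = true := by rw [h', ← hc]; simp
        simp [h', hocc, ← hc]
      · have hbe : (chAt t k == c') = false := by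
          rw [← hc]; exact beq_eq_false_iff_ne.mpr (fun h => h' h.symm)
        simp [hbe, h', hd c']
  | some p =>
    obtain ⟨hpk, hpc, hocc⟩ := getLast?_occC t k c p hlast
    have hdc : d.get? c = some ((p : Int)) := by rw [hd c, hlast]; rfl
    have hplt : p < t.length := by omega
    have hchp : chAt t p = c := by simpa using hpc
    have hget : PySem.List.pyGetD (mylSpec t k) ((p : Int)) ((0 : Int), (0 : Int))
        = (aV t p, bV t p) := by
      rw [PySem.List.pyGetD_natCast]
      exact getD_mylSpec t k p hplt hpk
    have hstep : tmStep (mylSpec t k, d) ((k : Int), c) =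
        ((mylSpec t k).set k
          (aV t p + 1, bV t p + aV t p * ((k : Int) - (p : Int)) + ((k : Int) - (p : Int) - 1)),
         d.insert c (k : Int)) := by
      simp [tmStep, hdc, hget]
    have e1 : occC t k (chAt t k) = occC t p (chAt t p) ++ [p] := by
      rw [hchp, ← hc]; exact hocc
    have haV : aV t k = aV t p + 1 := by
      simp [aV, e1]
    have hbV : bV t k = bV t p + aV t p * ((k : Int) - (p : Int)) + ((k : Int) - (p : Int) - 1) := by
      simp only [bV, e1, List.map_append, List.sum_append, List.map_cons, List.map_nil,
        List.sum_cons, List.sum_nil, add_zero]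
      have h1 : (fun i : Nat => (k : Int) - (i : Int) - 1)
          = fun i : Nat => (((p : Int) - (i : Int) - 1) + ((k : Int) - (p : Int))) := by
        funext i; ring
      rw [h1, PySem.List.sum_map_add_int, PySem.List.sum_map_const_int]
      simp only [aV]
    have hset := mylSpec_set t k hk
    rw [haV, hbV] at hset
    constructor
    · rw [hstep, hset]
    · intro c'
      rw [hstep]
      rw [PySem.Dict.get?_insert, occC_succ]
      by_cases h' : c' = c
      · have hbe : (chAt t k == c') = true := by rw [h', ← hc]; simp
        simp [h', ← hc]
      · have hbe : (chAt t k == c') = false := by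
          rw [← hc]; exact beq_eq_false_iff_ne.mpr (fun h => h' h.symm)
        simp [hbe, h', hd c']

-- the main invariant of A's loop
lemma aLoop_inv (t : List Char) (k : Nat) (hk : k ≤ t.length) :
    ((PySem.List.enumerate (t.take k)).foldl tmStep
        ((List.range t.length).map (fun _ => (0, 0)), PySem.Dict.empty)).1 = mylSpec t k
    ∧ dInv t k ((PySem.List.enumerate (t.take k)).foldl tmStep
            ((List.range t.length).map (fun _ => (0, 0)), PySem.Dict.empty)).2 := by
  induction k with
  | zero =>
    constructor
    · simp [mylSpec]
    · intro c; simp [occC]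
  | succ k ih =>
    have hk' : k < t.length := by omega
    rw [take_succ_chAt t k hk', PySem.List.enumerate_append, List.foldl_append]
    have hlen : (t.take k).length = k := by simp; omega
    have henum : PySem.List.enumerate [chAt t k] ((0 : Int) + (t.take k).length)
        = [((k : Int), chAt t k)] := by
      rw [PySem.List.enumerate_cons, PySem.List.enumerate_nil, hlen]
      norm_num
    rw [henum]
    obtain ⟨h1, h2⟩ := ih (by omega)
    set st := (PySem.List.enumerate (t.take k)).foldl tmStep
        ((List.range t.length).map (fun _ => (0, 0)), PySem.Dict.empty) with hst
    have hstp : st = (mylSpec t k, st.2) := by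
      rw [← h1]
    rw [List.foldl_cons, List.foldl_nil, hstp]
    exact ⟨congrArg Prod.fst ((aLoop_step t k hk' st.2 h2).1),
           (aLoop_step t k hk' st.2 h2).2⟩

-- A's total is the sum of the bV values
lemma a_value (t : List Char) :
    ((((PySem.List.enumerate t).foldl tmStep
        ((List.range t.length).map (fun _ => (0, 0)), PySem.Dict.empty)).1.map (·.2)).sum)
      = ((List.range t.length).map (fun p => bV t p)).sum := by
  have h := (aLoop_inv t t.length (le_refl _)).1
  rw [List.take_length] at h
  rw [h, mylSpec, List.map_map]
  apply congrArg List.sum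
  apply List.map_congr_left
  intro p hp
  simp [List.mem_range.mp hp]

-- B's inner loop, closed form
lemma b_inner (t : List Char) (tot j : Int) :
    (PySem.List.pyRange 0 j 1).foldl (fun tot i =>
        if PySem.List.pyGetD t i ' ' == PySem.List.pyGetD t j ' ' then tot + (j - i - 1) else tot)
      tot
    = tot + (((PySem.List.pyRange 0 j 1).filter
        (fun i => PySem.List.pyGetD t i ' ' == PySem.List.pyGetD t j ' ')).map
          (fun i => j - i - 1)).sum := by
  rw [PySem.List.foldl_if_eq_foldl_filter, PySem.List.foldl_add]

-- B's value is the same sum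
lemma b_value (t : List Char) :
    (PySem.List.pyRange 0 (t.length : Int) 1).foldl (fun tot j =>
      (PySem.List.pyRange 0 j 1).foldl (fun tot i =>
        if PySem.List.pyGetD t i ' ' == PySem.List.pyGetD t j ' ' then tot + (j - i - 1) else tot)
        tot) 0
    = ((List.range t.length).map (fun p => bV t p)).sum := by
  have houter : (fun (tot j : Int) =>
      (PySem.List.pyRange 0 j 1).foldl (fun tot i =>
        if PySem.List.pyGetD t i ' ' == PySem.List.pyGetD t j ' ' then tot + (j - i - 1) else tot)
        tot)
      = fun (tot j : Int) => tot + (((PySem.List.pyRange 0 j 1).filter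
        (fun i => PySem.List.pyGetD t i ' ' == PySem.List.pyGetD t j ' ')).map
          (fun i => j - i - 1)).sum := by
    funext tot j; exact b_inner t tot j
  rw [houter, PySem.List.foldl_add, PySem.List.pyRange_zero_natCast, List.map_map, zero_add]
  apply congrArg List.sum
  apply List.map_congr_left
  intro j _
  show (((PySem.List.pyRange 0 (j : Int) 1).filter
      (fun i => PySem.List.pyGetD t i ' ' == PySem.List.pyGetD t (j : Int) ' ')).map
        (fun i => (j : Int) - i - 1)).sum = bV t j
  rw [PySem.List.pyRange_zero_natCast, List.filter_map, List.map_map]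
  simp [Function.comp_def, PySem.List.pyGetD_natCast, bV, occC, chAt]

theorem tresure_map_spec : Claim_equal_tresure_map := by
  intro s _
  show tresure_map s = tresure_map_alt s
  rw [tresure_map, tresure_map_alt]
  rw [a_value, b_value]
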